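-- pv_equiv track=rewrite | github.com/kermitt2/delft | scripts/update_wandb_short_model_name.py | extract_short_model_name
-- ===== SOURCE A (Python) =====
-- def extract_short_model_name(run_name: str) -> str:
--     """Extract short model name from a full run name.
--
--     Args:
--         run_name: Full run name like "grobid-date-BidLSTM_CRF"
--
--     Returns:
--         Short model name like "date"
--     """
--     # Known architectures to strip from the end
--     architectures = [
--         "BidLSTM_CRF_FEATURES",
--         "BidLSTM_ChainCRF_FEATURES",
--         "BidLSTM_CRF_CASING",
--         "BidLSTM_ChainCRF",
--         "BidLSTM_CNN_CRF",
--         "BidLSTM_CRF",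
--         "BidLSTM_CNN",
--         "BidLSTM",
--         "BidGRU_CRF",
--         "BERT_CRF_CHAR_FEATURES",
--         "BERT_ChainCRF_FEATURES",
--         "BERT_CRF_FEATURES",
--         "BERT_CRF_CHAR",
--         "BERT_ChainCRF",
--         "BERT_FEATURES",
--         "BERT_CRF",
--         "BERT",
--     ]
--
--     name = run_name
--
--     # Remove "grobid-" prefix if present
--     if name.startswith("grobid-"):
--         name = name[7:]
--
--     # Remove architecture suffix
--     for arch in architectures:
--         if name.endswith("-" + arch):
--             name = name[: -(len(arch) + 1)]
--             break
--
--     return name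
-- ===== SOURCE B (Python) =====
-- ARCHITECTURES = {
--     "BidLSTM_CRF_FEATURES",
--     "BidLSTM_ChainCRF_FEATURES",
--     "BidLSTM_CRF_CASING",
--     "BidLSTM_ChainCRF",
--     "BidLSTM_CNN_CRF",
--     "BidLSTM_CRF",
--     "BidLSTM_CNN",
--     "BidLSTM",
--     "BidGRU_CRF",
--     "BERT_CRF_CHAR_FEATURES",
--     "BERT_ChainCRF_FEATURES",
--     "BERT_CRF_FEATURES",
--     "BERT_CRF_CHAR",
--     "BERT_ChainCRF",
--     "BERT_FEATURES",
--     "BERT_CRF",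
--     "BERT",
-- }
--
--
-- def extract_short_model_name(run_name: str) -> str:
--     """Extract short model name from a full run name."""
--     i = 7 if run_name.startswith("grobid-") else 0
--     # One forward pass over the name, tracking where the segment after the
--     # last hyphen starts; no intermediate stripped copy is ever built.
--     seg_start = i
--     saw_hyphen = False
--     for j in range(i, len(run_name)):
--         if run_name[j] == '-':
--             seg_start = j + 1
--             saw_hyphen = True
--     # A hyphen-terminated final segment equal to an architecture name gets
--     # stripped (exact vs A's suffix tests: no architecture name contains '-').
--     if saw_hyphen and run_name[seg_start:] in ARCHITECTURES:
--         return run_name[i:seg_start - 1]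
--     return run_name[i:]
-- ===== Notes on version B (the rewrite author's own statement) =====
-- stated objective: alternative
-- what changed: B never builds a stripped copy and never runs suffix comparisons: it makes one forward index scan over the name recording where the segment after the last hyphen starts, then does a single set membership test on that segment and slices the original string by index; A instead loops over 17 architecture names testing endswith('-'+arch) on a prefix-stripped copy.
import Mathlib
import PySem

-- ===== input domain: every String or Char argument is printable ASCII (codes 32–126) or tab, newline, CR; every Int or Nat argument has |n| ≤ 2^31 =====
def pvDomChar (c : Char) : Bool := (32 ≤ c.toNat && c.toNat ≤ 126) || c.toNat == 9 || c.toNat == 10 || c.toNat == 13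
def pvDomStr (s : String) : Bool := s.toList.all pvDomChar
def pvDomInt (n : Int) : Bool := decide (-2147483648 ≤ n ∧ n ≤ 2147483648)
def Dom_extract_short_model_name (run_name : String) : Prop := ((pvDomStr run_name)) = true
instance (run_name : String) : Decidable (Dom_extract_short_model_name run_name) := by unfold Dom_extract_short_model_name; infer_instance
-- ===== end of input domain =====

-- B replaces A's loop of 17 endswith('-'+arch) tests by ONE forward scan that tracks where the
-- segment after the last hyphen starts, then a single set membership test (alternative; exact
-- because no architecture name contains '-').

-- ===== PORT A =====
-- A's architecture list (names as lists of chars).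
def pvArchsA : List (List Char) :=
  ["BidLSTM_CRF_FEATURES".toList, "BidLSTM_ChainCRF_FEATURES".toList, "BidLSTM_CRF_CASING".toList,
   "BidLSTM_ChainCRF".toList, "BidLSTM_CNN_CRF".toList, "BidLSTM_CRF".toList, "BidLSTM_CNN".toList,
   "BidLSTM".toList, "BidGRU_CRF".toList, "BERT_CRF_CHAR_FEATURES".toList, "BERT_ChainCRF_FEATURES".toList,
   "BERT_CRF_FEATURES".toList, "BERT_CRF_CHAR".toList, "BERT_ChainCRF".toList, "BERT_FEATURES".toList,
   "BERT_CRF".toList, "BERT".toList]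

-- A's for-loop with break: first arch with name.endswith("-"+arch) strips, else fall through.
def pvALoop : List (List Char) → List Char → List Char
  | [], name => name
  | arch :: rest, name =>
    if PySem.Chars.endswith name ('-' :: arch) = true then
      PySem.List.slice name none (some (-((arch.length + 1 : Nat) : Int)))   -- name[:-(len(arch)+1)]
    else pvALoop rest name

def extract_short_model_name (run_name : String) : String :=
  let name0 := run_name.toList
  let name := if PySem.Chars.startswith name0 ("grobid-".toList) = true
              then PySem.List.slice name0 (some 7) none else name0            -- name[7:]
  String.ofList (pvALoop pvArchsA name)

-- ===== PORT B =====
-- B's set of architecture names (membership-only constant).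
def pvArchsB : List (List Char) :=
  ["BidLSTM_CRF_FEATURES".toList, "BidLSTM_ChainCRF_FEATURES".toList, "BidLSTM_CRF_CASING".toList,
   "BidLSTM_ChainCRF".toList, "BidLSTM_CNN_CRF".toList, "BidLSTM_CRF".toList, "BidLSTM_CNN".toList,
   "BidLSTM".toList, "BidGRU_CRF".toList, "BERT_CRF_CHAR_FEATURES".toList, "BERT_ChainCRF_FEATURES".toList,
   "BERT_CRF_FEATURES".toList, "BERT_CRF_CHAR".toList, "BERT_ChainCRF".toList, "BERT_FEATURES".toList,
   "BERT_CRF".toList, "BERT".toList]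

-- B's forward for-loop over run_name[j] for j in range(i, len(run_name)), carried state
-- (seg_start, saw_hyphen); j is the absolute index of the head character.
def pvBScan : List Char → Nat → Nat → Bool → Nat × Bool
  | [], _, segStart, saw => (segStart, saw)
  | c :: rest, j, segStart, saw =>
    if c = '-' then pvBScan rest (j + 1) (j + 1) true
    else pvBScan rest (j + 1) segStart saw

-- Slices run_name[i:], run_name[seg_start:], run_name[i:seg_start-1] are ported by hand as
-- drop/take (exact: all indices are nonnegative, and take gives [] when the stop is before i,
-- as Python's slice does).
def extract_short_model_name_alt (run_name : String) : String :=
  let cs := run_name.toList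
  let i := if PySem.Chars.startswith cs ("grobid-".toList) = true then 7 else 0
  let r := pvBScan (cs.drop i) i i false
  if r.2 = true ∧ cs.drop r.1 ∈ pvArchsB then
    String.ofList ((cs.drop i).take (r.1 - 1 - i))
  else
    String.ofList (cs.drop i)

-- ===== PRECONDITION & SPEC =====
def Spec_extract_short_model_name (run_name : String) (out : String) : Prop := out = extract_short_model_name_alt run_name
instance (run_name : String) (out : String) : Decidable (Spec_extract_short_model_name run_name out) := by unfold Spec_extract_short_model_name; infer_instance

-- ===== CLAIM (what is proved, stated in full; the proofs are below) =====
def Claim_equal_extract_short_model_name : Prop := ∀ (run_name : String), Dom_extract_short_model_name run_name → Spec_extract_short_model_name run_name (extract_short_model_name run_name)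

-- ===== LEMMAS AND PROOFS =====

-- The head of a nonempty dropWhile fails the predicate.
lemma pv_dropWhile_head_false (r d' : List Char) (p : Char → Bool) (x : Char)
    (hdr : r.dropWhile p = x :: d') : p x = false := by
  induction r with
  | nil => simp at hdr
  | cons y r' ih =>
      rw [List.dropWhile_cons] at hdr
      by_cases hy : p y = true
      · rw [if_pos hy] at hdr; exact ih hdr
      · rw [if_neg hy] at hdr; cases hdr; simpa using hy

-- For c-free t: (t ++ [c]) is a prefix of r iff takeWhile (≠ c) r = t and t is strictly shorter than r.
lemma pv_prefix_takeWhile (r t : List Char) (c : Char) (hc : c ∉ t) :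
    (t ++ [c]) <+: r ↔ r.takeWhile (fun x => x ≠ c) = t ∧ t.length < r.length := by
  constructor
  · rintro ⟨s, rfl⟩
    refine ⟨?_, by simp⟩
    induction t with
    | nil => simp
    | cons y t' ih =>
        have hy : (decide (y ≠ c)) = true := by
          simp only [decide_eq_true_iff]; exact fun h => hc (by simp [h])
        simp only [List.cons_append, List.takeWhile_cons, hy, if_true]
        rw [ih (fun h => hc (List.mem_cons_of_mem _ h))]
  · rintro ⟨ht, hlen⟩
    have hsplit : r.takeWhile (fun x => decide (x ≠ c)) ++ r.dropWhile (fun x => decide (x ≠ c)) = r :=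
      List.takeWhile_append_dropWhile
    cases hdr : r.dropWhile (fun x => decide (x ≠ c)) with
    | nil =>
        exfalso
        have hr : r = t := by rw [← hsplit, hdr, ht, List.append_nil]
        rw [hr] at hlen; exact absurd hlen (lt_irrefl _)
    | cons x d' =>
        have hx : x = c := by
          have h2 : decide (x ≠ c) = false := pv_dropWhile_head_false r d' _ x hdr
          simpa using h2
        refine ⟨d', ?_⟩
        conv_rhs => rw [← hsplit]
        rw [hdr, ht, hx]; simp

-- A's endswith test characterised by the last segment of name.
lemma pv_endswith_iff (name a : List Char) (hc : ('-' : Char) ∉ a) :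
    PySem.Chars.endswith name ('-' :: a) = true ↔
      name.reverse.takeWhile (fun x => x ≠ '-') = a.reverse ∧ a.length < name.length := by
  rw [PySem.Chars.endswith_iff]
  have h1 : ('-' :: a) <:+ name ↔ ('-' :: a).reverse <+: name.reverse := by
    constructor
    · intro h; exact List.reverse_prefix.mpr (by simpa using h)
    · intro h; simpa using List.reverse_prefix.mp h
  rw [h1]
  have h2 : ('-' :: a).reverse = a.reverse ++ ['-'] := by simp
  rw [h2, pv_prefix_takeWhile _ _ _ (by simpa using hc)]
  simp

-- A's loop equals the canonical split-and-lookup, for any list of hyphen-free architecture names.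
lemma pv_aLoop_eq (as : List (List Char)) (name : List Char)
    (h : ∀ a ∈ as, ('-' : Char) ∉ a) :
    pvALoop as name =
      (if (name.reverse.takeWhile (fun c => c ≠ '-')).length < name.length ∧
          (name.reverse.takeWhile (fun c => c ≠ '-')).reverse ∈ as then
        name.take (name.length - (name.reverse.takeWhile (fun c => c ≠ '-')).length - 1)
      else name) := by
  induction as with
  | nil => simp [pvALoop]
  | cons a rest ih =>
    have ha : ('-' : Char) ∉ a := h a (List.mem_cons_self)
    by_cases he : PySem.Chars.endswith name ('-' :: a) = true
    · obtain ⟨ht, hlen⟩ := (pv_endswith_iff name a ha).mp he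
      rw [pvALoop, if_pos he]
      have hcond : (name.reverse.takeWhile (fun c => c ≠ '-')).length < name.length ∧
          (name.reverse.takeWhile (fun c => c ≠ '-')).reverse ∈ a :: rest := by
        refine ⟨by rw [ht]; simpa using hlen, by rw [ht]; simp⟩
      rw [if_pos hcond, PySem.List.slice_to_neg_natCast _ _ (by omega)]
      rw [ht]
      simp [Nat.sub_sub]
    · rw [pvALoop, if_neg he, ih (fun a ha' => h a (List.mem_cons_of_mem _ ha'))]
      have hne : ¬ ((name.reverse.takeWhile (fun c => c ≠ '-')).length < name.length ∧
          (name.reverse.takeWhile (fun c => c ≠ '-')).reverse = a) := by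
        rintro ⟨hlt, heq⟩
        apply he
        apply (pv_endswith_iff name a ha).mpr
        have : name.reverse.takeWhile (fun c => c ≠ '-') = a.reverse := by
          rw [← heq]; simp
        refine ⟨this, ?_⟩
        rw [this] at hlt; simpa using hlt
      by_cases hm : (name.reverse.takeWhile (fun c => c ≠ '-')).length < name.length ∧
          (name.reverse.takeWhile (fun c => c ≠ '-')).reverse ∈ rest
      · rw [if_pos hm, if_pos ⟨hm.1, List.mem_cons_of_mem _ hm.2⟩]
      · rw [if_neg hm, if_neg ?_]
        rintro ⟨hlt, hmem⟩
        rcases List.mem_cons.mp hmem with heq | hmem'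
        · exact hne ⟨hlt, heq⟩
        · exact hm ⟨hlt, hmem'⟩

lemma pv_archsB_eq : pvArchsB = pvArchsA := by decide

lemma pv_archsA_hyphen_free : ∀ a ∈ pvArchsA, ('-' : Char) ∉ a := by decide

-- The canonical result: strip the final hyphen-terminated segment iff it is an architecture name.
def pvCanon (name : List Char) : List Char :=
  if (name.reverse.takeWhile (fun c => c ≠ '-')).length < name.length ∧
      (name.reverse.takeWhile (fun c => c ≠ '-')).reverse ∈ pvArchsA then
    name.take (name.length - (name.reverse.takeWhile (fun c => c ≠ '-')).length - 1)
  else name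

lemma pv_aLoop_canon (name : List Char) : pvALoop pvArchsA name = pvCanon name :=
  pv_aLoop_eq pvArchsA name pv_archsA_hyphen_free

-- The hyphen-free tail is strictly shorter than the list iff a hyphen occurs.
lemma pv_tail_lt_iff (l : List Char) :
    (l.reverse.takeWhile (fun c => c ≠ '-')).length < l.length ↔ ('-' : Char) ∈ l := by
  constructor
  · intro h
    by_contra hm
    have : l.reverse.takeWhile (fun c => decide (c ≠ '-')) = l.reverse := by
      apply List.takeWhile_eq_self_iff.mpr
      intro x hx
      simp only [decide_eq_true_iff]
      intro hx'; exact hm (by subst hx'; simpa using hx)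
    rw [this] at h; simp at h
  · intro hm
    have hle : (l.reverse.takeWhile (fun c => decide (c ≠ '-'))).length ≤ l.length := by
      simpa using (List.takeWhile_prefix (fun c => decide (c ≠ '-')) (l := l.reverse)).length_le
    rcases lt_or_eq_of_le hle with h | h
    · exact h
    · exfalso
      have heq : l.reverse.takeWhile (fun c => decide (c ≠ '-')) = l.reverse :=
        (List.takeWhile_prefix _).eq_of_length (by simpa using h)
      have := List.takeWhile_eq_self_iff.mp heq '-' (by simpa using hm)
      simp at this

-- takeWhile over the reversed cons, when a hyphen already occurs in the rest.
lemma pv_tw_cons_mem (c : Char) (rest : List Char) (hm : ('-' : Char) ∈ rest) :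
    (c :: rest).reverse.takeWhile (fun x => x ≠ '-') =
      rest.reverse.takeWhile (fun x => x ≠ '-') := by
  rw [List.reverse_cons, List.takeWhile_append]
  have hlt : (rest.reverse.takeWhile (fun x => decide (x ≠ '-'))).length < rest.length := by
    simpa using (pv_tail_lt_iff rest).mpr hm
  rw [if_neg (by simp only [List.length_reverse]; omega)]

-- … and when no hyphen occurs in the rest.
lemma pv_tw_cons_nomem (c : Char) (rest : List Char) (hm : ('-' : Char) ∉ rest) :
    (c :: rest).reverse.takeWhile (fun x => x ≠ '-') =
      rest.reverse ++ (if c = '-' then [] else [c]) := by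
  have hall : rest.reverse.takeWhile (fun x => decide (x ≠ '-')) = rest.reverse := by
    apply List.takeWhile_eq_self_iff.mpr
    intro x hx
    simp only [decide_eq_true_iff]
    intro hx'; exact hm (by subst hx'; simpa using hx)
  rw [List.reverse_cons, List.takeWhile_append, if_pos (by rw [hall])]
  by_cases hc : c = '-'
  · subst hc; simp
  · simp [List.takeWhile, hc]

-- B's forward scan characterised: saw records whether a '-' occurs, and seg_start becomes the
-- absolute position just after the LAST '-' (expressed via takeWhile on the reversed list).
lemma pv_bScan_eq (l : List Char) (j s : Nat) (b : Bool) :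
    pvBScan l j s b =
      ((if ('-' : Char) ∈ l then
          j + l.length - (l.reverse.takeWhile (fun c => c ≠ '-')).length else s),
        b || decide (('-' : Char) ∈ l)) := by
  induction l generalizing j s b with
  | nil => simp [pvBScan]
  | cons c rest ih =>
    have hmem : ('-' : Char) ∈ c :: rest ∨ True := Or.inr trivial
    by_cases hc : c = '-'
    · subst hc
      rw [pvBScan, if_pos rfl, ih]
      have h1 : ('-' : Char) ∈ ('-' :: rest) := List.mem_cons_self
      rw [Prod.mk.injEq]
      by_cases hm : ('-' : Char) ∈ rest
      · have htw := congrArg List.length (pv_tw_cons_mem '-' rest hm)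
        have hle : (rest.reverse.takeWhile (fun c => decide (c ≠ '-'))).length ≤ rest.length := by
          simpa using (List.takeWhile_prefix (fun c => decide (c ≠ '-')) (l := rest.reverse)).length_le
        rw [if_pos hm, if_pos h1, htw]
        exact ⟨by simp only [List.length_cons]; omega, by simp [h1]⟩
      · have htw := congrArg List.length (pv_tw_cons_nomem '-' rest hm)
        rw [if_neg hm, if_pos h1, htw]
        constructor
        · simp
          omega
        · simp [h1]
    · rw [pvBScan, if_neg hc, ih]
      by_cases hm : ('-' : Char) ∈ rest
      · have h1 : ('-' : Char) ∈ c :: rest := List.mem_cons_of_mem _ hm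
        have htw := congrArg List.length (pv_tw_cons_mem c rest hm)
        rw [Prod.mk.injEq, if_pos hm, if_pos h1, htw]
        exact ⟨by simp only [List.length_cons]; omega, by simp [hm, h1]⟩
      · have h1 : ('-' : Char) ∉ c :: rest := by
          simp only [List.mem_cons]
          rintro (h | h)
          · exact hc h.symm
          · exact hm h
        rw [if_neg hm, if_neg h1]
        simp [hm, h1]

-- Dropping all but the last t characters (t = length of the hyphen-free tail of the reverse)
-- yields exactly that tail, reversed back.
lemma pv_drop_rtail (l : List Char) :
    l.drop (l.length - (l.reverse.takeWhile (fun c => c ≠ '-')).length) =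
      (l.reverse.takeWhile (fun c => c ≠ '-')).reverse := by
  have h := List.takeWhile_prefix (fun c => decide (c ≠ '-')) (l := l.reverse)
  generalize hg : l.reverse.takeWhile (fun c => decide (c ≠ '-')) = tw at h ⊢
  obtain ⟨s, hs⟩ := h
  have hl : l = s.reverse ++ tw.reverse := by
    rw [← List.reverse_reverse l, ← hs]; simp
  rw [hl]
  have hlen : (s.reverse ++ tw.reverse).length - tw.length = s.reverse.length := by simp
  rw [hlen, List.drop_left]

-- B's scan-then-test computation equals the canonical result on name = cs.drop i.
lemma pv_b_eq_canon (cs : List Char) (i : Nat) :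
    (if (pvBScan (cs.drop i) i i false).2 = true ∧
        cs.drop (pvBScan (cs.drop i) i i false).1 ∈ pvArchsA then
      (cs.drop i).take ((pvBScan (cs.drop i) i i false).1 - 1 - i)
    else cs.drop i) = pvCanon (cs.drop i) := by
  simp only [pv_bScan_eq, Bool.false_or, pvCanon]
  by_cases hm : ('-' : Char) ∈ cs.drop i
  · have hlt : ((cs.drop i).reverse.takeWhile (fun c => decide (c ≠ '-'))).length <
        (cs.drop i).length := (pv_tail_lt_iff _).mpr hm
    have hdd : cs.drop (i + (cs.drop i).length -
        ((cs.drop i).reverse.takeWhile (fun c => decide (c ≠ '-'))).length) =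
        ((cs.drop i).reverse.takeWhile (fun c => decide (c ≠ '-'))).reverse := by
      rw [show i + (cs.drop i).length -
            ((cs.drop i).reverse.takeWhile (fun c => decide (c ≠ '-'))).length =
          i + ((cs.drop i).length -
            ((cs.drop i).reverse.takeWhile (fun c => decide (c ≠ '-'))).length) by omega,
        ← List.drop_drop, pv_drop_rtail]
    simp only [if_pos hm, hdd, decide_eq_true_eq]
    by_cases hmem : ((cs.drop i).reverse.takeWhile (fun c => decide (c ≠ '-'))).reverse ∈ pvArchsA
    · rw [if_pos ⟨hm, hmem⟩, if_pos ⟨hlt, hmem⟩,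
        show i + (cs.drop i).length -
            ((cs.drop i).reverse.takeWhile (fun c => decide (c ≠ '-'))).length - 1 - i =
          (cs.drop i).length -
            ((cs.drop i).reverse.takeWhile (fun c => decide (c ≠ '-'))).length - 1 by omega]
    · rw [if_neg (by rintro ⟨_, h2⟩; exact hmem h2), if_neg (by rintro ⟨_, h2⟩; exact hmem h2)]
  · have hnlt : ¬ ((cs.drop i).reverse.takeWhile (fun c => decide (c ≠ '-'))).length <
        (cs.drop i).length := fun h => hm ((pv_tail_lt_iff _).mp h)
    simp only [if_neg hm, decide_eq_true_eq]
    rw [if_neg (by rintro ⟨h1, _⟩; exact hm h1), if_neg (by rintro ⟨h1, _⟩; exact hnlt h1)]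

-- ===== VERDICT (by name: the statement is the Claim_ definition above) =====
theorem extract_short_model_name_spec : Claim_equal_extract_short_model_name := by
  intro run_name _
  unfold Spec_extract_short_model_name extract_short_model_name extract_short_model_name_alt
  simp only [pv_archsB_eq, ← apply_ite String.ofList]
  by_cases h : PySem.Chars.startswith run_name.toList ("grobid-".toList) = true
  · rw [if_pos h, if_pos h, PySem.List.slice_from run_name.toList (a := 7) (by norm_num)]
    exact congrArg String.ofList
      ((pv_aLoop_canon _).trans (pv_b_eq_canon run_name.toList 7).symm)
  · rw [if_neg h, if_neg h]
    have := (pv_aLoop_canon run_name.toList).trans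
      ((pv_b_eq_canon run_name.toList 0).symm)
    simp only [List.drop_zero] at this
    exact congrArg String.ofList this
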